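-- pv_equiv track=rewrite | github.com/yoelbuzgalo/unit-04-123 | group_characters.py | group_characters
-- ===== SOURCE A (Python) =====
-- def is_upper(character):
--     '''
--     This function returns True if character is upper case between A to Z
--     '''
--     return (character >= "A" and character <= "Z")
--
-- def is_lower(character):
--     '''
--     This function returns True if character is lower case between A to Z
--     '''
--     return (character >= "a" and character <= "z")
--
-- def is_digit(character):
--     '''
--     This function returns True if character string is a digit character, between 0 and 9
--     '''
--     return (character >= "0" and character <= "9")
--
-- def group_characters(characters):
--     '''
--     This function reorganizes characters in a characters string in a specific order; digits first, then lower case, then upper cases and returns it as a string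
--     '''
--     digit_characters = '' # Initializes digit_characters variable to contain only digit characters
--     lower_characters = '' # Initializes lower_characters variable to contain only lower case characters
--     upper_characters = '' # Initializes upper_characters variable to contain only upper case characters
--     for index in range(len(characters)):
--         if is_digit(characters[index]):
--             # Enters this block only if the character of the given index is a digit
--             digit_characters += characters[index] # Adds the character to digit_characters variable group
--             continue # Continues to the next iteration instead of continuing to next if blocks
--         if is_lower(characters[index]):
--             # Enters this block only if the character of the given index is a lower case
--             lower_characters += characters[index] # Adds the character to lower_case variable group
--             continue # Continues to the next iteration instead of continuing to next if blocks
--         if is_upper(characters[index]):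
--             # Enters this block only if the character of the given index is an upper case
--             upper_characters += characters[index] # Adds the character to upper_case variable group
--     grouped_characters = digit_characters + lower_characters + upper_characters
--     return grouped_characters
-- ===== SOURCE B (Python) =====
-- def group_characters(characters):
--     '''
--     Digits first, then lower case, then upper case; other characters dropped.
--     Stable key-sort of the kept characters instead of three accumulator strings.
--     '''
--     def group_key(c):
--         return 0 if '0' <= c <= '9' else 1 if 'a' <= c <= 'z' else 2
--
--     kept = [c for c in characters
--             if '0' <= c <= '9' or 'a' <= c <= 'z' or 'A' <= c <= 'Z']
--     return ''.join(sorted(kept, key=group_key))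
-- ===== Notes on version B (the rewrite author's own statement) =====
-- stated objective: idiomatic
-- what changed: Replaced A's three accumulator strings filled by an index loop with a comprehension keeping the grouped characters followed by a single stable sort with a 0/1/2 group key.
import Mathlib
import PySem

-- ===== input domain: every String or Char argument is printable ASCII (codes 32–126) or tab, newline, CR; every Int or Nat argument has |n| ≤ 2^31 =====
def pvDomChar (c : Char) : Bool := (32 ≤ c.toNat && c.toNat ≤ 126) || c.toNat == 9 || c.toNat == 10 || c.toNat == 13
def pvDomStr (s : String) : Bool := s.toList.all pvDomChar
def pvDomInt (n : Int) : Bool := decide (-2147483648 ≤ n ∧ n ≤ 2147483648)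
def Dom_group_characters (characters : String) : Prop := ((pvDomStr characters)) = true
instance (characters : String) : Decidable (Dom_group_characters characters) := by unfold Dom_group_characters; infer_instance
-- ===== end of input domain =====

-- B replaces A's three accumulator strings with a filter plus one stable key-sort (idiomatic, not faster).

-- ===== PORT A =====
def pvIsUpper (c : Char) : Bool := decide ('A' ≤ c) && decide (c ≤ 'Z')
def pvIsLower (c : Char) : Bool := decide ('a' ≤ c) && decide (c ≤ 'z')
def pvIsDigit (c : Char) : Bool := decide ('0' ≤ c) && decide (c ≤ '9')

def pvStepA (st : List Char × List Char × List Char) (c : Char) :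
    List Char × List Char × List Char :=
  if pvIsDigit c then (st.1 ++ [c], st.2.1, st.2.2)
  else if pvIsLower c then (st.1, st.2.1 ++ [c], st.2.2)
  else if pvIsUpper c then (st.1, st.2.1, st.2.2 ++ [c])
  else st

def group_characters (characters : String) : String :=
  let chars := characters.toList
  let st := (PySem.List.pyRange 0 (chars.length : Int) 1).foldl
    (fun st index => pvStepA st (PySem.List.pyGetD chars index ' ')) ([], [], [])
  String.mk (st.1 ++ st.2.1 ++ st.2.2)

-- ===== PORT B =====
def pvGroupKey (c : Char) : Int :=
  if decide ('0' ≤ c) && decide (c ≤ '9') then 0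
  else if decide ('a' ≤ c) && decide (c ≤ 'z') then 1
  else 2

def pvKeep (c : Char) : Bool :=
  (decide ('0' ≤ c) && decide (c ≤ '9')) || (decide ('a' ≤ c) && decide (c ≤ 'z'))
    || (decide ('A' ≤ c) && decide (c ≤ 'Z'))

def group_characters_alt (characters : String) : String :=
  let kept := characters.toList.filter pvKeep
  String.mk (PySem.List.sorted kept pvGroupKey false)

-- ===== PRECONDITION & SPEC =====
def Spec_group_characters (characters : String) (out : String) : Prop := out = group_characters_alt characters
instance (characters : String) (out : String) : Decidable (Spec_group_characters characters out) := by unfold Spec_group_characters; infer_instance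

-- ===== CLAIM (what is proved, stated in full; the proofs are below) =====
def Claim_equal_group_characters : Prop := ∀ (characters : String), Dom_group_characters characters → Spec_group_characters characters (group_characters characters)

-- ===== LEMMAS AND PROOFS =====

def pvP0 (c : Char) : Bool := pvIsDigit c
def pvP1 (c : Char) : Bool := !pvIsDigit c && pvIsLower c
def pvP2 (c : Char) : Bool := !pvIsDigit c && !pvIsLower c && pvIsUpper c

theorem pvFoldA (xs : List Char) : ∀ (d l u : List Char),
    xs.foldl pvStepA (d, l, u)
      = (d ++ xs.filter pvP0, l ++ xs.filter pvP1, u ++ xs.filter pvP2) := by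
  induction xs with
  | nil => intro d l u; simp
  | cons c t ih =>
    intro d l u
    by_cases h0 : pvIsDigit c
    · simp [List.foldl_cons, pvStepA, h0, ih, pvP0, pvP1, pvP2]
    · by_cases h1 : pvIsLower c
      · simp [List.foldl_cons, pvStepA, h0, h1, ih, pvP0, pvP1, pvP2]
      · by_cases h2 : pvIsUpper c
        · simp [List.foldl_cons, pvStepA, h0, h1, h2, ih, pvP0, pvP1, pvP2]
        · simp [List.foldl_cons, pvStepA, h0, h1, h2, ih, pvP0, pvP1, pvP2]

theorem pvInsertBy_skip {α : Type} (bef : α → α → Bool) (x : α) (as bs : List α)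
    (h : ∀ a ∈ as, bef x a = false) :
    PySem.List.insertBy bef x (as ++ bs) = as ++ PySem.List.insertBy bef x bs := by
  induction as with
  | nil => simp
  | cons a t ih =>
    have ha : bef x a = false := h a (by simp)
    simp [PySem.List.insertBy, ha, ih (fun y hy => h y (by simp [hy]))]

theorem pvInsertBy_front {α : Type} (bef : α → α → Bool) (x : α) (bs : List α)
    (h : ∀ b ∈ bs, bef x b = true) :
    PySem.List.insertBy bef x bs = x :: bs := by
  cases bs with
  | nil => simp [PySem.List.insertBy]
  | cons b t => simp [PySem.List.insertBy, h b (by simp)]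

theorem pvKey_range (c : Char) : pvGroupKey c = 0 ∨ pvGroupKey c = 1 ∨ pvGroupKey c = 2 := by
  unfold pvGroupKey; split_ifs <;> simp

theorem pvKey_mem_filter (k : Int) (xs : List Char) :
    ∀ c ∈ xs.filter (fun c => decide (pvGroupKey c = k)), pvGroupKey c = k := by
  intro c hc
  simpa using (List.of_mem_filter hc)

theorem pvSortedSplit (fs : List Char) :
    PySem.List.sorted fs pvGroupKey false
      = fs.filter (fun c => decide (pvGroupKey c = 0))
        ++ fs.filter (fun c => decide (pvGroupKey c = 1))
        ++ fs.filter (fun c => decide (pvGroupKey c = 2)) := by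
  rw [PySem.List.sorted_eq_foldl_insertBy]
  induction fs using List.reverseRecOn with
  | nil => simp
  | append_singleton t x ih =>
    rw [List.foldl_append, List.foldl_cons, List.foldl_nil, ih]
    set bef : Char → Char → Bool := fun a b => decide (pvGroupKey a < pvGroupKey b) with hbef
    set f0 := t.filter (fun c => decide (pvGroupKey c = 0)) with hf0
    set f1 := t.filter (fun c => decide (pvGroupKey c = 1)) with hf1
    set f2 := t.filter (fun c => decide (pvGroupKey c = 2)) with hf2
    have m0 : ∀ a ∈ f0, pvGroupKey a = 0 := pvKey_mem_filter 0 t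
    have m1 : ∀ a ∈ f1, pvGroupKey a = 1 := pvKey_mem_filter 1 t
    have m2 : ∀ a ∈ f2, pvGroupKey a = 2 := pvKey_mem_filter 2 t
    rcases pvKey_range x with hk | hk | hk
    · have h1 : PySem.List.insertBy bef x (f0 ++ (f1 ++ f2)) = f0 ++ PySem.List.insertBy bef x (f1 ++ f2) :=
        pvInsertBy_skip bef x f0 (f1 ++ f2) (fun a ha => by simp [hbef, hk, m0 a ha])
      have h2 : PySem.List.insertBy bef x (f1 ++ f2) = x :: (f1 ++ f2) :=
        pvInsertBy_front bef x (f1 ++ f2) (fun b hb => by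
          rcases List.mem_append.mp hb with h | h
          · simp [hbef, hk, m1 b h]
          · simp [hbef, hk, m2 b h])
      rw [show f0 ++ f1 ++ f2 = f0 ++ (f1 ++ f2) from List.append_assoc f0 f1 f2, h1, h2]
      simp [hf0, hf1, hf2, List.filter_append, hk]
    · have h1 : PySem.List.insertBy bef x (f0 ++ (f1 ++ f2)) = f0 ++ PySem.List.insertBy bef x (f1 ++ f2) :=
        pvInsertBy_skip bef x f0 (f1 ++ f2) (fun a ha => by simp [hbef, hk, m0 a ha])
      have h2 : PySem.List.insertBy bef x (f1 ++ f2) = f1 ++ PySem.List.insertBy bef x f2 :=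
        pvInsertBy_skip bef x f1 f2 (fun a ha => by simp [hbef, hk, m1 a ha])
      have h3 : PySem.List.insertBy bef x f2 = x :: f2 :=
        pvInsertBy_front bef x f2 (fun b hb => by simp [hbef, hk, m2 b hb])
      rw [show f0 ++ f1 ++ f2 = f0 ++ (f1 ++ f2) from List.append_assoc f0 f1 f2, h1, h2, h3]
      simp [hf0, hf1, hf2, List.filter_append, hk]
    · have h1 : PySem.List.insertBy bef x (f0 ++ (f1 ++ f2)) = f0 ++ PySem.List.insertBy bef x (f1 ++ f2) :=
        pvInsertBy_skip bef x f0 (f1 ++ f2) (fun a ha => by simp [hbef, hk, m0 a ha])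
      have h2 : PySem.List.insertBy bef x (f1 ++ f2) = f1 ++ PySem.List.insertBy bef x f2 :=
        pvInsertBy_skip bef x f1 f2 (fun a ha => by simp [hbef, hk, m1 a ha])
      have h3 : PySem.List.insertBy bef x f2 = f2 ++ [x] :=
        PySem.List.insertBy_of_forall_not_before bef x f2 (fun b hb => by simp [hbef, hk, m2 b hb])
      rw [show f0 ++ f1 ++ f2 = f0 ++ (f1 ++ f2) from List.append_assoc f0 f1 f2, h1, h2, h3]
      simp [hf0, hf1, hf2, List.filter_append, hk]

theorem pvFilterEq0 (xs : List Char) :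
    (xs.filter pvKeep).filter (fun c => decide (pvGroupKey c = 0)) = xs.filter pvP0 := by
  rw [List.filter_filter]
  apply List.filter_congr
  intro c _
  by_cases hd : (decide ('0' ≤ c) && decide (c ≤ '9')) = true <;>
    by_cases hl : (decide ('a' ≤ c) && decide (c ≤ 'z')) = true <;>
    simp [pvGroupKey, pvKeep, pvP0, pvIsDigit, pvIsLower, pvIsUpper, hd, hl]

theorem pvFilterEq1 (xs : List Char) :
    (xs.filter pvKeep).filter (fun c => decide (pvGroupKey c = 1)) = xs.filter pvP1 := by
  rw [List.filter_filter]
  apply List.filter_congr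
  intro c _
  by_cases hd : (decide ('0' ≤ c) && decide (c ≤ '9')) = true <;>
    by_cases hl : (decide ('a' ≤ c) && decide (c ≤ 'z')) = true <;>
    simp [pvGroupKey, pvKeep, pvP1, pvIsDigit, pvIsLower, pvIsUpper, hd, hl]

theorem pvFilterEq2 (xs : List Char) :
    (xs.filter pvKeep).filter (fun c => decide (pvGroupKey c = 2)) = xs.filter pvP2 := by
  rw [List.filter_filter]
  apply List.filter_congr
  intro c _
  by_cases hd : (decide ('0' ≤ c) && decide (c ≤ '9')) = true <;>
    by_cases hl : (decide ('a' ≤ c) && decide (c ≤ 'z')) = true <;>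
    simp [pvGroupKey, pvKeep, pvP2, pvIsDigit, pvIsLower, pvIsUpper, hd, hl]

-- ===== VERDICT (by name: the statement is the Claim_ definition above) =====
theorem group_characters_spec : Claim_equal_group_characters := by
  intro characters _
  unfold Spec_group_characters group_characters group_characters_alt
  dsimp only
  rw [PySem.List.foldl_pyRange_zero_pyGetD' characters.toList ' ' pvStepA ([], [], []),
    pvFoldA, pvSortedSplit, pvFilterEq0, pvFilterEq1, pvFilterEq2]
  simp
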